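-- pv_equiv track=rewrite | github.com/jeongwoongc/Tic-Tac-Toe | tictactoe.py | centerCoord
-- ===== SOURCE A (Python) =====
-- def centerCoord(w, rows):
--     qWidth = w // rows
--     qh = 0
--     quadrants = []
--
--     for l in range(rows):
--         qw = 0
--         q_i = (qWidth+5)//2
--         if l == 0:
--             qh += q_i
--         else:
--             qh += q_i*2
--         for n in range(rows):
--             if n == 0:
--                 qw += q_i
--             else:
--                 qw += q_i*2
--             quadrants.append((qw,qh))
--
--     return quadrants
-- ===== SOURCE B (Python) =====
-- def centerCoord(w, rows):
--     q_i = ((w // rows) + 5) // 2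
--     return [((2 * n + 1) * q_i, (2 * l + 1) * q_i)
--             for l in range(rows) for n in range(rows)]
-- ===== Notes on version B (the rewrite author's own statement) =====
-- stated objective: simpler
-- what changed: Replaces the nested accumulator loops (running qw/qh sums with first-iteration special cases) by a direct closed-form coordinate formula ((2n+1)*q_i, (2l+1)*q_i) over the same index ranges.
import Mathlib
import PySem

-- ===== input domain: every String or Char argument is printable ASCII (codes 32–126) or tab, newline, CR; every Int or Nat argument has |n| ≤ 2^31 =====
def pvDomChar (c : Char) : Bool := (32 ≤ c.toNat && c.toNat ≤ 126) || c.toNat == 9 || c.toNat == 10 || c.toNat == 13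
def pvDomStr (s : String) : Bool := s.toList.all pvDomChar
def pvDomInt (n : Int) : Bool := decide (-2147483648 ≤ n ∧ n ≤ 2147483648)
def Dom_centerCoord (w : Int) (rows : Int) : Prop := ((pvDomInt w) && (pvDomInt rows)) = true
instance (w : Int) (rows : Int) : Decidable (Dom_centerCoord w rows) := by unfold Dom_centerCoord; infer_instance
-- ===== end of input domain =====

-- B replaces A's running qh/qw accumulators (with first-iteration special cases) by the
-- closed-form coordinate formula ((2n+1)*q_i, (2l+1)*q_i); objective: simpler.

-- ===== PORT A =====
def centerCoord (w : Int) (rows : Int) : List (Int × Int) :=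
  let qWidth := PySem.Int.floordiv w rows
  let st := (PySem.List.pyRange 0 rows 1).foldl
    (fun (st : Int × List (Int × Int)) l =>
      let q_i := PySem.Int.floordiv (qWidth + 5) 2
      let qh := if l == 0 then st.1 + q_i else st.1 + q_i * 2
      let inner := (PySem.List.pyRange 0 rows 1).foldl
        (fun (st2 : Int × List (Int × Int)) n =>
          let qw := if n == 0 then st2.1 + q_i else st2.1 + q_i * 2
          (qw, st2.2 ++ [(qw, qh)]))
        (0, st.2)
      (qh, inner.2))
    (0, [])
  st.2

-- ===== PORT B =====
def centerCoord_alt (w : Int) (rows : Int) : List (Int × Int) :=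
  let q_i := PySem.Int.floordiv (PySem.Int.floordiv w rows + 5) 2
  (PySem.List.pyRange 0 rows 1).flatMap (fun l =>
    (PySem.List.pyRange 0 rows 1).map (fun n => ((2 * n + 1) * q_i, (2 * l + 1) * q_i)))

-- ===== PRECONDITION & SPEC =====
-- Pre_ excludes rows = 0, on which Python's '//' raises ZeroDivisionError (in A and in B).
def Pre_centerCoord (w : Int) (rows : Int) : Prop := rows ≠ 0
instance (w : Int) (rows : Int) : Decidable (Pre_centerCoord w rows) := by unfold Pre_centerCoord; infer_instance
def pvWitness_centerCoord : Int × Int := (9, 3)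

def Spec_centerCoord (w : Int) (rows : Int) (out : List (Int × Int)) : Prop := out = centerCoord_alt w rows
instance (w : Int) (rows : Int) (out : List (Int × Int)) : Decidable (Spec_centerCoord w rows out) := by unfold Spec_centerCoord; infer_instance

-- ===== CLAIM (what is proved, stated in full; the proofs are below) =====
def Claim_equal_centerCoord : Prop := ∀ (w : Int) (rows : Int), Dom_centerCoord w rows → Pre_centerCoord w rows → Spec_centerCoord w rows (centerCoord w rows)

-- ===== LEMMAS AND PROOFS =====

-- Inner loop of A: the running qw accumulator produces exactly the pairs ((2n+1)*q_i, qh).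
theorem pv_inner (q_i qh : Int) (m : Nat) (acc : List (Int × Int)) :
    (((List.range m).map (fun (k : Nat) => (k : Int))).foldl
      (fun (st2 : Int × List (Int × Int)) n =>
        let qw := if n == 0 then st2.1 + q_i else st2.1 + q_i * 2
        (qw, st2.2 ++ [(qw, qh)]))
      (0, acc)) =
    ((if m = 0 then 0 else (2 * (m : Int) - 1) * q_i),
      acc ++ (List.range m).map (fun (n : Nat) => ((2 * (n : Int) + 1) * q_i, qh))) := by
  induction m with
  | zero => simp
  | succ m ih =>
    rw [List.range_succ, List.map_append, List.foldl_append, ih, List.map_append]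
    cases m with
    | zero => simp
    | succ m =>
      simp only [List.map_cons, List.map_nil, List.foldl_cons, List.foldl_nil]
      simp
      constructor
      · split_ifs with h
        · omega
        · ring
      · split_ifs with h
        · omega
        · ring

-- Outer loop of A: the running qh accumulator produces row constants (2l+1)*q_i.
theorem pv_outer (q_i : Int) (m j : Nat) (acc : List (Int × Int)) :
    (((List.range j).map (fun (k : Nat) => (k : Int))).foldl
      (fun (st : Int × List (Int × Int)) l =>
        let qh := if l == 0 then st.1 + q_i else st.1 + q_i * 2
        let inner := (((List.range m).map (fun (k : Nat) => (k : Int))).foldl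
          (fun (st2 : Int × List (Int × Int)) n =>
            let qw := if n == 0 then st2.1 + q_i else st2.1 + q_i * 2
            (qw, st2.2 ++ [(qw, qh)]))
          (0, st.2))
        (qh, inner.2))
      (0, acc)) =
    ((if j = 0 then 0 else (2 * (j : Int) - 1) * q_i),
      acc ++ (List.range j).flatMap (fun (l : Nat) =>
        (List.range m).map (fun (n : Nat) => ((2 * (n : Int) + 1) * q_i, (2 * (l : Int) + 1) * q_i)))) := by
  induction j with
  | zero => simp
  | succ j ih =>
    rw [List.range_succ, List.map_append, List.foldl_append, ih, List.flatMap_append]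
    simp only [List.map_cons, List.map_nil, List.foldl_cons, List.foldl_nil, pv_inner,
      List.flatMap_cons, List.flatMap_nil, List.append_nil, List.append_assoc]
    cases j with
    | zero => simp
    | succ j =>
      simp
      constructor
      · split_ifs with h
        · omega
        · ring
      · intro a ha
        split_ifs with h
        · omega
        · ring

-- ===== VERDICT (by name: the statement is the Claim_ definition above) =====
theorem centerCoord_spec : Claim_equal_centerCoord := by
  intro w rows _ _
  unfold Spec_centerCoord
  simp only [centerCoord, centerCoord_alt]
  rw [PySem.List.pyRange_one]
  simp only [sub_zero, zero_add]
  rw [pv_outer]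
  simp [List.flatMap_map, Function.comp_def]
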